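-- pv_equiv track=rewrite | github.com/pankajroy4/DSA_practise | PYTHON/prime.py | solve
-- ===== SOURCE A (Python) =====
-- def solve(n,s):
--     buff,x,count=s[0],1,1
--     for i in range(1,n):
--         if buff==s[i]:
--             count+=1
--         else:
--             x*=count
--             count,buff=1,s[i]
--     return x*count
-- ===== SOURCE B (Python) =====
-- def solve(n, s):
--     if n <= 1:
--         return 1
--     cuts = [0] + [i for i in range(1, n) if s[i] != s[i - 1]] + [n]
--     result = 1
--     for a, b in zip(cuts, cuts[1:]):
--         result *= b - a
--     return result
-- ===== Notes on version B (the rewrite author's own statement) =====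
-- stated objective: alternative
-- what changed: B first computes the list of run boundaries (indices where the character changes) in one comprehension and then multiplies the gaps between consecutive boundaries, instead of A's inline state machine carrying (buff, x, count).
import Mathlib
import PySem

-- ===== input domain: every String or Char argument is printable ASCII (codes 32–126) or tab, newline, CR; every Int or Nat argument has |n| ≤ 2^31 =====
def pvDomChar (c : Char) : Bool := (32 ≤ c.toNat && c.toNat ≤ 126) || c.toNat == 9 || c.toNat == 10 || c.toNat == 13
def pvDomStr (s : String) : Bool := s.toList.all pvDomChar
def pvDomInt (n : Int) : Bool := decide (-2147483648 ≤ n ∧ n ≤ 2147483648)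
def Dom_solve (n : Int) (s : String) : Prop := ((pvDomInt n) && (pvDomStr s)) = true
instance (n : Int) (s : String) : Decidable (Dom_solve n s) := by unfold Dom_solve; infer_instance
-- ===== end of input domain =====

-- B computes the run boundaries first and multiplies the gaps, instead of A's inline
-- (buff, x, count) state machine; objective: alternative decomposition, same O(n) cost.

-- ===== PORT A =====
-- s[0] / s[i] are in range for every access under Pre_solve; the ' ' default never fires there.
def solve (n : Int) (s : String) : Int :=
  let cs := s.toList
  let st := (PySem.List.pyRange 1 n 1).foldl
    (fun (st : Char × Int × Int) i =>
      if st.1 == PySem.List.pyGetD cs i ' ' then (st.1, st.2.1, st.2.2 + 1)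
      else (PySem.List.pyGetD cs i ' ', st.2.1 * st.2.2, 1))
    (PySem.List.pyGetD cs 0 ' ', 1, 1)
  st.2.1 * st.2.2

-- ===== PORT B =====
def solve_alt (n : Int) (s : String) : Int :=
  if n ≤ 1 then 1
  else
    let cs := s.toList
    let cuts := [(0 : Int)] ++ (PySem.List.pyRange 1 n 1).filter
        (fun i => !(PySem.List.pyGetD cs i ' ' == PySem.List.pyGetD cs (i - 1) ' ')) ++ [n]
    (cuts.zip cuts.tail).foldl (fun r (p : Int × Int) => r * (p.2 - p.1)) 1

-- ===== PRECONDITION & SPEC =====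
-- Pre_solve excludes exactly the inputs where Python A raises IndexError: empty s (s[0]) or n > len(s).
def Pre_solve (n : Int) (s : String) : Prop := s.toList ≠ [] ∧ n ≤ (s.toList.length : Int)
instance (n : Int) (s : String) : Decidable (Pre_solve n s) := by unfold Pre_solve; infer_instance
def pvWitness_solve : Int × String := (4, "aabc")

def Spec_solve (n : Int) (s : String) (out : Int) : Prop := out = solve_alt n s
instance (n : Int) (s : String) (out : Int) : Decidable (Spec_solve n s out) := by unfold Spec_solve; infer_instance

-- ===== CLAIM (what is proved, stated in full; the proofs are below) =====
def Claim_equal_solve : Prop := ∀ (n : Int) (s : String), Dom_solve n s → Pre_solve n s → Spec_solve n s (solve n s)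

-- ===== LEMMAS AND PROOFS =====

-- gap product along the chain prev :: l ++ [K]
def gp : Int → List Int → Int → Int
  | prev, [], K => K - prev
  | prev, m :: l, K => (m - prev) * gp m l K

theorem gp_append (l : List Int) (prev m K : Int) :
    gp prev (l ++ [m]) K = gp prev l m * (K - m) := by
  induction l generalizing prev with
  | nil => simp [gp]
  | cons a l ih => simp [gp, ih, mul_assoc]

theorem zipfold_eq_gp (l : List Int) (p acc K : Int) :
    (((p :: (l ++ [K])).zip (l ++ [K])).foldl
        (fun r (q : Int × Int) => r * (q.2 - q.1)) acc) = acc * gp p l K := by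
  induction l generalizing p acc with
  | nil => simp [gp]
  | cons m l ih => simp [gp, ih, mul_assoc]

theorem filter_append_singleton {α : Type} (f : α → Bool) (l : List α) (a : α) :
    (l ++ [a]).filter f = l.filter f ++ (if f a then [a] else []) := by
  simp [List.filter_append]; split <;> simp_all

-- the loop invariant of A, phrased against B's boundary list
theorem invariant (cs : List Char) (n : Int) (hn : 1 ≤ n) :
    (((PySem.List.pyRange 1 n 1).foldl
        (fun (st : Char × Int × Int) i =>
          if st.1 == PySem.List.pyGetD cs i ' ' then (st.1, st.2.1, st.2.2 + 1)
          else (PySem.List.pyGetD cs i ' ', st.2.1 * st.2.2, 1))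
        (PySem.List.pyGetD cs 0 ' ', 1, 1)).1
      = PySem.List.pyGetD cs (n - 1) ' ') ∧
    (∀ K : Int,
      gp 0 ((PySem.List.pyRange 1 n 1).filter
          (fun i => !(PySem.List.pyGetD cs i ' ' == PySem.List.pyGetD cs (i - 1) ' '))) K
        = ((PySem.List.pyRange 1 n 1).foldl
            (fun (st : Char × Int × Int) i =>
              if st.1 == PySem.List.pyGetD cs i ' ' then (st.1, st.2.1, st.2.2 + 1)
              else (PySem.List.pyGetD cs i ' ', st.2.1 * st.2.2, 1))
            (PySem.List.pyGetD cs 0 ' ', 1, 1)).2.1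
          * (K - (n - ((PySem.List.pyRange 1 n 1).foldl
            (fun (st : Char × Int × Int) i =>
              if st.1 == PySem.List.pyGetD cs i ' ' then (st.1, st.2.1, st.2.2 + 1)
              else (PySem.List.pyGetD cs i ' ', st.2.1 * st.2.2, 1))
            (PySem.List.pyGetD cs 0 ' ', 1, 1)).2.2))) := by
  induction n, hn using Int.le_induction with
  | base => simp [PySem.List.pyRange_one_eq_nil, gp]
  | succ n hn ih =>
    obtain ⟨ih1, ih2⟩ := ih
    rw [PySem.List.pyRange_one_succ_right (by omega)]
    rw [List.foldl_append, filter_append_singleton]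
    by_cases h : PySem.List.pyGetD cs n ' ' = PySem.List.pyGetD cs (n - 1) ' '
    · simp only [h, beq_self_eq_true, Bool.not_true, List.foldl_cons, List.foldl_nil]
      rw [if_neg Bool.false_ne_true, List.append_nil]
      rw [ih1, ← h]
      simp only [beq_self_eq_true, if_true]
      refine ⟨by simp, fun K => ?_⟩
      rw [ih2 K]; ring
    · have hb : (PySem.List.pyGetD cs (n - 1) ' ' == PySem.List.pyGetD cs n ' ') = false := by
        simp only [beq_eq_false_iff_ne, ne_eq]; exact fun e => h e.symm
      have hb' : (PySem.List.pyGetD cs n ' ' == PySem.List.pyGetD cs (n - 1) ' ') = false := by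
        simp only [beq_eq_false_iff_ne, ne_eq]; exact h
      simp only [hb', Bool.not_false, List.foldl_cons, List.foldl_nil]
      rw [ih1, hb]
      rw [if_neg Bool.false_ne_true, if_pos trivial]
      refine ⟨by simp, fun K => ?_⟩
      rw [gp_append, ih2 n]; ring

theorem solve_eq (n : Int) (s : String) : solve n s = solve_alt n s := by
  by_cases hn : n ≤ 1
  · simp [solve, solve_alt, hn, PySem.List.pyRange_one_eq_nil hn]
  · have h := invariant s.toList n (by omega)
    simp only [solve, solve_alt, if_neg hn, List.cons_append,
      List.tail_cons]
    rw [zipfold_eq_gp]; simp only [List.nil_append]; rw [h.2 n]; ring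

-- ===== VERDICT (by name: the statement is the Claim_ definition above) =====
theorem solve_spec : Claim_equal_solve := by
  intro n s _ _
  unfold Spec_solve
  exact solve_eq n s
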